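-- pv_equiv track=rewrite | github.com/aby03/Geometric-Reconstruction | Main_Server/Test_Object_Detection/server_od.py | get_obj_str
-- ===== SOURCE A (Python) =====
-- def replace_last(source_string, replace_what, replace_with):
--     head, _sep, tail = source_string.rpartition(replace_what)
--     return head + replace_with + tail
--
-- def get_obj_str(p_class):
--     obj_str = "There "
--     p_class.sort()
--     prev = None
--     prev_count = 0
--     tmp_str = ""
--     first = True
--     if len(p_class) == 0:
--         obj_str = ""
--     else:
--         for i in p_class:
--             tmp_str += str(i)
--             if prev == i:
--                 prev_count += 1
--             else:
--                 if prev != None: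
--                     if first:
--                         if prev_count == 1:
--                             obj_str += "is a " + prev
--                         else:
--                             obj_str += "are " + str(prev_count)+ " " + prev
--                         first = False
--                     else:
--                         if prev_count == 1:
--                             obj_str += ", a " + prev
--                         else:
--                             obj_str += ", " + str(prev_count)+ " " + prev
--                 prev = i
--                 prev_count = 1
--         if first:
--             if prev_count == 1:
--                 obj_str += "is a " + prev
--             else:
--                 obj_str += "are " + str(prev_count)+ " " + prev
--             first = False
--         else:
--             if prev_count == 1:
--                 obj_str += ", a " + prev
--             else:
--                 obj_str += ", " + str(prev_count)+ " " + prev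
--         obj_str += " in view"
--         obj_str = replace_last(obj_str, ',', ' and')
--         if obj_str.startswith(' and'):
--             obj_str = obj_str[4:]
--     return obj_str
-- ===== SOURCE B (Python) =====
-- def get_obj_str(p_class):
--     p_class.sort()
--     if not p_class:
--         return ""
--     counts = {}
--     for name in p_class:
--         counts[name] = counts.get(name, 0) + 1
--     groups = list(counts.items())
--     phrases = [("a " + n) if c == 1 else (str(c) + " " + n) for n, c in groups]
--     verb = "is " if groups[0][1] == 1 else "are "
--     s = "There " + verb + ", ".join(phrases) + " in view"
--     i = s.rfind(',')
--     if i == -1: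
--         return s
--     return s[:i] + " and" + s[i + 1:]
-- ===== Notes on version B (the rewrite author's own statement) =====
-- stated objective: simpler
-- what changed: A's single-pass run-length state machine with prev/prev_count/first flags and duplicated emission branches is replaced by a dict count of the sorted list into ordered (name, count) groups, a phrase list joined with ', ', and one splice of the last comma into ' and'.
import Mathlib
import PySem

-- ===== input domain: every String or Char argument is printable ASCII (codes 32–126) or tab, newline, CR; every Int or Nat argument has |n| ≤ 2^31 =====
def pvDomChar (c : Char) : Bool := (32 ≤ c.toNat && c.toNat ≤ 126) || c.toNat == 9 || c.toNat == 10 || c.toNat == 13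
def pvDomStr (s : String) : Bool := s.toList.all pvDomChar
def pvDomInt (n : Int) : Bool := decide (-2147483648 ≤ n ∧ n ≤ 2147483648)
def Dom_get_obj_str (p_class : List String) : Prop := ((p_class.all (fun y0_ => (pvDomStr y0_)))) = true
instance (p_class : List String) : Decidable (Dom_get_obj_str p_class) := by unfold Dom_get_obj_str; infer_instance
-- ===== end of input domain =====

-- B replaces A's hand-rolled run-length loop with a dict count + phrase join (simpler, no speed claim);
-- equivalence is about the RETURN value — both Pythons sort p_class in place identically.

-- ===== PORT A =====
-- A's four emission branches (the Python writes them twice: inside the loop and after it)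
def pvEmitA (first : Bool) (c : Int) (n : String) : List Char :=
  if first then
    (if c = 1 then "is a ".toList ++ n.toList
     else "are ".toList ++ PySem.Int.toChars c ++ " ".toList ++ n.toList)
  else
    (if c = 1 then ", a ".toList ++ n.toList
     else ", ".toList ++ PySem.Int.toChars c ++ " ".toList ++ n.toList)

-- the for-loop; state = (obj_str, prev, prev_count, tmp_str, first)
def pvLoopA : List String → List Char × Option String × Int × List Char × Bool → List Char × Option String × Int × List Char × Bool
  | [], st => st
  | i :: rest, (obj, prev, cnt, tmp, first) =>
    let tmp' := tmp ++ i.toList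
    if prev = some i then pvLoopA rest (obj, prev, cnt + 1, tmp', first)
    else
      match prev with
      | none => pvLoopA rest (obj, some i, 1, tmp', first)
      | some p => pvLoopA rest (obj ++ pvEmitA first cnt p, some i, 1, tmp', false)

-- replace_last via str.rpartition: head + replace_with + tail
def pvReplaceLast (s what w : List Char) : List Char :=
  if PySem.Chars.rfind s what = -1 then [] ++ w ++ s
  else s.take (PySem.Chars.rfind s what).toNat ++ w
    ++ s.drop ((PySem.Chars.rfind s what).toNat + what.length)

-- A's last two statements: obj_str = replace_last(obj_str, ',', ' and'); strip a leading ' and'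
def pvFinishA (s : List Char) : String :=
  if PySem.Chars.startswith (pvReplaceLast s [','] " and".toList) " and".toList
  then String.ofList (PySem.Chars.slice (pvReplaceLast s [','] " and".toList) (some 4) none)
  else String.ofList (pvReplaceLast s [','] " and".toList)

def get_obj_str (p_class : List String) : String :=
  let sortedL := PySem.List.sorted p_class (fun x => x)
  if sortedL.length = 0 then ""
  else
    match pvLoopA sortedL ("There ".toList, none, 0, [], true) with
    | (obj, prev, cnt, _, first) =>
      pvFinishA (obj ++ pvEmitA first cnt (prev.getD "") ++ " in view".toList)

-- ===== PORT B =====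
def pvPhrase (p : String × Int) : List Char :=
  if p.2 = 1 then "a ".toList ++ p.1.toList
  else PySem.Int.toChars p.2 ++ " ".toList ++ p.1.toList

-- B's tail: i = s.rfind(','); s if i == -1 else s[:i] + " and" + s[i+1:]
def pvFinishB (s : List Char) : String :=
  if PySem.Chars.rfind s [','] = -1 then String.ofList s
  else String.ofList (s.take (PySem.Chars.rfind s [',']).toNat ++ " and".toList
    ++ s.drop ((PySem.Chars.rfind s [',']).toNat + 1))

def get_obj_str_alt (p_class : List String) : String :=
  let sortedL := PySem.List.sorted p_class (fun x => x)
  match sortedL with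
  | [] => ""
  | x :: xs =>
    let groups := ((x :: xs).foldl (fun d n => d.insert n (d.getD n 0 + 1)) PySem.Dict.empty).items
    let verb := if (groups.headD ("", 0)).2 = 1 then "is ".toList else "are ".toList
    pvFinishB ("There ".toList ++ verb ++ PySem.Chars.join ", ".toList (groups.map pvPhrase) ++ " in view".toList)

-- ===== PRECONDITION & SPEC =====
def Spec_get_obj_str (p_class : List String) (out : String) : Prop := out = get_obj_str_alt p_class
instance (p_class : List String) (out : String) : Decidable (Spec_get_obj_str p_class out) := by unfold Spec_get_obj_str; infer_instance

-- ===== CLAIM (what is proved, stated in full; the proofs are below) =====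
def Claim_equal_get_obj_str : Prop := ∀ (p_class : List String), Dom_get_obj_str p_class → Spec_get_obj_str p_class (get_obj_str p_class)

-- ===== LEMMAS AND PROOFS =====

-- run-length groups of the (sorted) list, mirroring A's loop state (current name, current count)
def pvRuns : String → Int → List String → List (String × Int)
  | x, c, [] => [(x, c)]
  | x, c, y :: ys => if y = x then pvRuns x (c + 1) ys else (x, c) :: pvRuns y 1 ys

def pvRender : Bool → List (String × Int) → List Char
  | _, [] => []
  | first, (n, c) :: t => pvEmitA first c n ++ pvRender false t

-- A's final emission applied to a loop state
def pvFinal (st : List Char × Option String × Int × List Char × Bool) : List Char :=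
  st.1 ++ pvEmitA st.2.2.2.2 st.2.2.1 (st.2.1.getD "")

lemma pvRuns_ne_nil (x : String) (c : Int) (xs : List String) : pvRuns x c xs ≠ [] := by
  induction xs generalizing x c with
  | nil => simp [pvRuns]
  | cons y ys ih => simp only [pvRuns]; split <;> simp [ih]

lemma pvLoopA_render (xs : List String) : ∀ (x : String) (c : Int) (first : Bool) (obj tmp : List Char),
    pvFinal (pvLoopA xs (obj, some x, c, tmp, first)) = obj ++ pvRender first (pvRuns x c xs) := by
  induction xs with
  | nil => intro x c first obj tmp; simp [pvLoopA, pvRuns, pvRender, pvFinal]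
  | cons y ys ih =>
    intro x c first obj tmp
    by_cases h : x = y
    · subst h
      simp only [pvLoopA, pvRuns]
      exact ih x (c + 1) first obj (tmp ++ x.toList)
    · have h' : ¬ (some x = some y) := by simp [h]
      have h'' : ¬ (y = x) := fun hy => h hy.symm
      simp only [pvLoopA, pvRuns, if_neg h', if_neg h'']
      rw [ih y 1 false (obj ++ pvEmitA first c x) (tmp ++ y.toList)]
      simp [pvRender, List.append_assoc]

-- the dict-count loop over the tail of a sorted list appends exactly the run-length groups
lemma pvDict_items_runs (xs : List String) : ∀ (x : String) (c : Int) (d : PySem.Dict String Int),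
    x ∉ d.keys → (∀ k ∈ d.keys, k ∉ xs) → (x :: xs).Pairwise (· ≤ ·) →
    (xs.foldl (fun d n => d.insert n (d.getD n 0 + 1)) (d.insert x c)).items
      = d.items ++ pvRuns x c xs := by
  induction xs with
  | nil =>
    intro x c d hx _ _
    have hc : d.contains x = false := by
      rw [PySem.Dict.contains_eq_decide_mem_keys]; simp [hx]
    simp [pvRuns, PySem.Dict.items_insert_of_not_contains d c hc]
  | cons y ys ih =>
    intro x c d hx hkeys hp
    by_cases h : y = x
    · subst h
      have h1 : (d.insert y c).getD y 0 = c := PySem.Dict.getD_insert_self d y c 0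
      simp only [List.foldl, h1, PySem.Dict.insert_insert_self]
      rw [ih y (c + 1) d hx
        (fun k hk hmem => hkeys k hk (List.mem_cons_of_mem _ hmem))
        hp.of_cons]
      simp [pvRuns]
    · have hxny : ¬ x = y := fun hy => h hy.symm
      have hxy : x ≤ y := (List.pairwise_cons.mp hp).1 y List.mem_cons_self
      have hpy : (y :: ys).Pairwise (· ≤ ·) := hp.of_cons
      have hxys : x ∉ ys := fun hmem =>
        h (le_antisymm ((List.pairwise_cons.mp hpy).1 x hmem) hxy)
      have hdx : d.contains x = false := by
        rw [PySem.Dict.contains_eq_decide_mem_keys]; simp [hx]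
      have hkeysx : (d.insert x c).keys = d.keys ++ [x] :=
        PySem.Dict.keys_insert_of_not_contains d c hdx
      have hyk : y ∉ d.keys := fun hk => hkeys y hk List.mem_cons_self
      have hgd : (d.insert x c).getD y 0 = 0 := by
        rw [PySem.Dict.getD_insert_of_ne d c 0 h]
        exact PySem.Dict.getD_of_not_contains d 0
          (by rw [PySem.Dict.contains_eq_decide_mem_keys]; simp [hyk])
      simp only [List.foldl, hgd, zero_add]
      rw [ih y 1 (d.insert x c)
        (by rw [hkeysx]; simp [hyk, h])
        (by intro k hk
            rw [hkeysx] at hk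
            rcases List.mem_append.mp hk with hk | hk
            · exact fun hm => hkeys k hk (List.mem_cons_of_mem _ hm)
            · simp only [List.mem_singleton] at hk; subst hk; exact hxys)
        hpy]
      rw [PySem.Dict.items_insert_of_not_contains d c hdx]
      simp [pvRuns, h, List.append_assoc]

lemma pvRender_false (t : List (String × Int)) :
    pvRender false t = (t.map (fun p => ", ".toList ++ pvPhrase p)).flatten := by
  induction t with
  | nil => simp [pvRender]
  | cons p t ih =>
    obtain ⟨n, c⟩ := p
    have he : pvEmitA false c n = ", ".toList ++ pvPhrase (n, c) := by
      by_cases h : c = 1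
      · simp only [pvEmitA, pvPhrase, h, if_true, if_false, Bool.false_eq_true]; rfl
      · simp only [pvEmitA, pvPhrase, h, if_false]; simp [List.append_assoc]
    simp [pvRender, ih, he]

lemma pvJoin_eq (sep : List Char) (p : List Char) (ps : List (List Char)) :
    PySem.Chars.join sep (p :: ps) = p ++ (ps.map (fun q => sep ++ q)).flatten := by
  induction ps generalizing p with
  | nil => simp [PySem.Chars.join_singleton]
  | cons q ps ih => rw [PySem.Chars.join_cons_cons, ih q]; simp

lemma pvRender_true (n : String) (c : Int) (t : List (String × Int)) :
    pvRender true ((n, c) :: t)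
      = (if c = 1 then "is ".toList else "are ".toList)
        ++ PySem.Chars.join ", ".toList (((n, c) :: t).map pvPhrase) := by
  rw [List.map_cons, pvJoin_eq]
  have he : pvEmitA true c n
      = (if c = 1 then "is ".toList else "are ".toList) ++ pvPhrase (n, c) := by
    by_cases h : c = 1
    · simp only [pvEmitA, pvPhrase, h, if_true]; rfl
    · simp only [pvEmitA, pvPhrase, h, if_false]; simp [List.append_assoc]
  simp [pvRender, pvRender_false, he, Function.comp_def, List.append_assoc]

lemma pvRfind_go_cases (s sub : List Char) (n : Nat) :
    PySem.Chars.rfind.go s sub n = -1 ∨ 1 ≤ PySem.Chars.rfind.go s sub n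
      ∨ (PySem.Chars.rfind.go s sub n = 0 ∧ sub.isPrefixOf s = true) := by
  induction n with
  | zero =>
    simp only [PySem.Chars.rfind.go]
    split
    · right; right; exact ⟨rfl, by assumption⟩
    · left; rfl
  | succ j ih =>
    simp only [PySem.Chars.rfind.go]
    split
    · right; left; omega
    · exact ih

lemma pvRfind_cases (s sub : List Char) (hpref : sub.isPrefixOf s = false) :
    PySem.Chars.rfind s sub = -1 ∨ 1 ≤ PySem.Chars.rfind s sub := by
  rcases pvRfind_go_cases s sub s.length with h | h | h
  · left; exact h
  · right; exact h
  · rw [h.1] at *; rw [h.2] at hpref; cases hpref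

-- the two post-processing steps agree on any string starting with 'T'
lemma pvFinish_eq (rest : List Char) : pvFinishA ('T' :: rest) = pvFinishB ('T' :: rest) := by
  have hpref : [','].isPrefixOf ('T' :: rest) = false := by simp [List.isPrefixOf]
  rcases pvRfind_cases ('T' :: rest) [','] hpref with hf | hf
  · have hR : pvReplaceLast ('T' :: rest) [','] " and".toList = " and".toList ++ 'T' :: rest := by
      unfold pvReplaceLast; rw [hf]; simp
    have hsw : PySem.Chars.startswith (" and".toList ++ 'T' :: rest) " and".toList = true := by
      rw [PySem.Chars.startswith_iff]; exact List.prefix_append _ _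
    unfold pvFinishA pvFinishB
    rw [hR, hf, hsw]
    simp only [if_true, PySem.Chars.slice_eq_listSlice]
    rw [PySem.List.slice_from _ (by norm_num),
      show ((4:Int).toNat) = (" and".toList).length from rfl, List.drop_left]
  · have hne : ¬ PySem.Chars.rfind ('T' :: rest) [','] = -1 := by omega
    obtain ⟨m, hm⟩ : ∃ m, (PySem.Chars.rfind ('T' :: rest) [',']).toNat = m + 1 :=
      ⟨(PySem.Chars.rfind ('T' :: rest) [',']).toNat - 1, by omega⟩
    have hR : pvReplaceLast ('T' :: rest) [','] " and".toList
        = ('T' :: rest).take (m + 1) ++ " and".toList ++ ('T' :: rest).drop (m + 1 + 1) := by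
      unfold pvReplaceLast; rw [if_neg hne, hm]; rfl
    have hsw : PySem.Chars.startswith
        (('T' :: rest).take (m + 1) ++ " and".toList ++ ('T' :: rest).drop (m + 1 + 1))
        " and".toList = false := by
      rw [show " and".toList = ' ' :: "and".toList from rfl]
      simp [PySem.Chars.startswith, List.isPrefixOf]
    unfold pvFinishA pvFinishB
    rw [hR, hsw, if_neg hne, hm]
    simp [Bool.false_eq_true]

-- ===== VERDICT (by name: the statement is the Claim_ definition above) =====
theorem get_obj_str_spec : Claim_equal_get_obj_str := by
  intro p_class _
  unfold Spec_get_obj_str get_obj_str get_obj_str_alt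
  cases hs : PySem.List.sorted p_class (fun x => x) with
  | nil => simp
  | cons x xs =>
    have hp : (x :: xs).Pairwise (· ≤ ·) := by
      have := PySem.List.sorted_pairwise p_class (fun x => x)
      rw [hs] at this; exact this
    rcases hL : pvLoopA (x :: xs) ("There ".toList, none, 0, [], true) with ⟨o, p, k, tm, f⟩
    have hA : o ++ pvEmitA f k (p.getD "") = "There ".toList ++ pvRender true (pvRuns x 1 xs) := by
      have h0 : pvLoopA (x :: xs) ("There ".toList, none, 0, [], true)
          = pvLoopA xs ("There ".toList, some x, 1, [] ++ x.toList, true) := by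
        simp [pvLoopA]
      have hr := pvLoopA_render xs x 1 true "There ".toList ([] ++ x.toList)
      rw [← h0, hL] at hr
      simpa [pvFinal] using hr
    have hB : ((x :: xs).foldl (fun d n => d.insert n (d.getD n 0 + 1)) PySem.Dict.empty).items
        = pvRuns x 1 xs := by
      simp only [List.foldl_cons, PySem.Dict.getD_empty, zero_add]
      rw [pvDict_items_runs xs x 1 PySem.Dict.empty
        (by simp [PySem.Dict.keys_empty]) (by simp [PySem.Dict.keys_empty]) hp]
      rfl
    obtain ⟨⟨n, c⟩, t, hg⟩ : ∃ g t, pvRuns x 1 xs = g :: t := by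
      cases hr : pvRuns x 1 xs with
      | nil => exact absurd hr (pvRuns_ne_nil x 1 xs)
      | cons g t => exact ⟨g, t, rfl⟩
    simp only [List.length_cons, Nat.add_one_ne_zero, if_false, hL, hB, hg, List.headD_cons]
    rw [hA, hg, pvRender_true]
    rw [show "There ".toList = 'T' :: "here ".toList from rfl]
    simp only [List.cons_append, List.append_assoc, List.map_cons]
    exact pvFinish_eq _
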